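-- pv_equiv track=rewrite | github.com/BullHorse67/paddleOCR | DocumentOCRSystemV4.py | _split_page_chunks
-- ===== SOURCE A (Python) =====
-- from typing import List, Dict, Any
--
-- def _split_page_chunks(total_pages: int, process_count: int) -> List[List[int]]:
--     """按进程数平均切分页索引，保证页码连续且覆盖完整。"""
--     if total_pages <= 0:
--         return []
--     process_count = max(1, min(process_count, total_pages))
--
--     base = total_pages // process_count
--     remain = total_pages % process_count
--
--     chunks = []
--     start = 0
--     for i in range(process_count):
--         size = base + (1 if i < remain else 0)
--         end = start + size
--         chunks.append(list(range(start, end)))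
--         start = end
--     return [chunk for chunk in chunks if chunk]
-- ===== SOURCE B (Python) =====
-- from typing import List
--
--
-- def _split_page_chunks(total_pages: int, process_count: int) -> List[List[int]]:
--     """Boundary-table formulation: compute all chunk boundaries in closed form,
--     then emit each chunk from consecutive boundary pairs (no running accumulator)."""
--     if total_pages <= 0:
--         return []
--     k = max(1, min(process_count, total_pages))
--     base, remain = divmod(total_pages, k)
--     bounds = [i * base + min(i, remain) for i in range(k + 1)]
--     return [list(range(s, e)) for s, e in zip(bounds, bounds[1:])]
-- ===== Notes on version B (the rewrite author's own statement) =====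
-- stated objective: alternative
-- what changed: Replaces the stateful loop that carries a running start/end accumulator and a trailing empty-chunk filter with a closed-form boundary table bounds[i] = i*base + min(i, remain) and a zip over consecutive boundary pairs.
import Mathlib
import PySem

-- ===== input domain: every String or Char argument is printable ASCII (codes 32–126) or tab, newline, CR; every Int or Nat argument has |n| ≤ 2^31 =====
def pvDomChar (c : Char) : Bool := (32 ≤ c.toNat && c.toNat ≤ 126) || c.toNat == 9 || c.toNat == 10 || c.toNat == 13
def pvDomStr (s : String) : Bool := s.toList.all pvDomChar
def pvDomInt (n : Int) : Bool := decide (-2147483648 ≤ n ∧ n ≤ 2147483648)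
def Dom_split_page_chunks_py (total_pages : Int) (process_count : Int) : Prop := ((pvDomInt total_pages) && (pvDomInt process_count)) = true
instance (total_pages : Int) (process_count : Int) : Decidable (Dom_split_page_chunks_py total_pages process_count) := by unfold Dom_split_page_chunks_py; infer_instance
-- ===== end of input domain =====

-- B replaces A's running start/end accumulator and trailing empty-chunk filter
-- with a closed-form boundary table and a zip over consecutive boundary pairs
-- (alternative decomposition, same cost). Equivalence is proved on all inputs.


-- ===== PORT A =====
def split_page_chunks_py (total_pages : Int) (process_count : Int) : List (List Int) :=
  if total_pages ≤ 0 then []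
  else
    let pc := max 1 (min process_count total_pages)
    let base := PySem.Int.floordiv total_pages pc
    let remain := PySem.Int.mod total_pages pc
    let st := (PySem.List.pyRange 0 pc 1).foldl
      (fun (acc : List (List Int) × Int) i =>
        let size := base + (if i < remain then 1 else 0)
        let e := acc.2 + size
        (acc.1 ++ [PySem.List.pyRange acc.2 e 1], e))
      ([], 0)
    st.1.filter (fun chunk => !chunk.isEmpty)

-- ===== PORT B =====
def split_page_chunks_py_alt (total_pages : Int) (process_count : Int) : List (List Int) :=
  if total_pages ≤ 0 then []
  else
    let k := max 1 (min process_count total_pages)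
    let base := PySem.Int.floordiv total_pages k
    let remain := PySem.Int.mod total_pages k
    let bounds := (PySem.List.pyRange 0 (k + 1) 1).map (fun i => i * base + min i remain)
    (bounds.zip (PySem.List.slice bounds (some 1) none)).map
      (fun p => PySem.List.pyRange p.1 p.2 1)

-- ===== PRECONDITION & SPEC =====
def Spec_split_page_chunks_py (total_pages : Int) (process_count : Int) (out : List (List Int)) : Prop := out = split_page_chunks_py_alt total_pages process_count
instance (total_pages : Int) (process_count : Int) (out : List (List Int)) : Decidable (Spec_split_page_chunks_py total_pages process_count out) := by unfold Spec_split_page_chunks_py; infer_instance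

-- ===== CLAIM (what is proved, stated in full; the proofs are below) =====
def Claim_equal_split_page_chunks_py : Prop := ∀ (total_pages : Int) (process_count : Int), Dom_split_page_chunks_py total_pages process_count → Spec_split_page_chunks_py total_pages process_count (split_page_chunks_py total_pages process_count)

-- ===== LEMMAS AND PROOFS =====

-- the boundary function shared by the two characterisations
def pvBound (base remain i : Int) : Int := i * base + min i remain

lemma pvBound_succ (base remain i : Int) :
    pvBound base remain (i + 1) = pvBound base remain i + (base + (if i < remain then 1 else 0)) := by
  unfold pvBound
  have h : (i + 1) * base = i * base + base := by ring
  rw [h]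
  split_ifs with h2 <;> omega

-- A's loop produces exactly the chunks [pvBound i, pvBound (i+1)) in order, with final start = pvBound n
lemma loopA (base remain : Int) (hr : 0 ≤ remain) : ∀ n : Nat,
    (PySem.List.pyRange 0 (n : Int) 1).foldl
      (fun (acc : List (List Int) × Int) i =>
        let size := base + (if i < remain then 1 else 0)
        let e := acc.2 + size
        (acc.1 ++ [PySem.List.pyRange acc.2 e 1], e))
      ([], 0)
    = ((PySem.List.pyRange 0 (n : Int) 1).map
        (fun i => PySem.List.pyRange (pvBound base remain i) (pvBound base remain (i + 1)) 1),
       pvBound base remain n) := by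
  intro n
  induction n with
  | zero =>
      simp [PySem.List.pyRange_one_eq_nil, pvBound]
      omega
  | succ m ih =>
      have h1 : ((m : Int) + 1) = ((m + 1 : Nat) : Int) := by push_cast; ring
      rw [← h1, PySem.List.pyRange_one_succ_right (by positivity), List.foldl_append, ih,
        List.map_append]
      simp only [List.foldl_cons, List.foldl_nil, List.map_cons, List.map_nil]
      rw [← pvBound_succ]

-- zipping a boundary list with its tail yields consecutive pairs
lemma zip_tail_pairs (g : Int → Int) : ∀ (n : Nat) (a : Int),
    ((PySem.List.pyRange a (a + n + 1) 1).map g).zip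
        (((PySem.List.pyRange a (a + n + 1) 1).map g).tail)
    = (PySem.List.pyRange a (a + n) 1).map (fun i => (g i, g (i + 1))) := by
  intro n
  induction n with
  | zero =>
      intro a
      simp [PySem.List.pyRange_one_eq_nil, PySem.List.pyRange_one_singleton]
  | succ m ih =>
      intro a
      have harg : a + ((m + 1 : Nat) : Int) + 1 = (a + 1) + (m : Nat) + 1 := by push_cast; ring
      have harg2 : a + ((m + 1 : Nat) : Int) = (a + 1) + (m : Nat) := by push_cast; ring
      rw [harg, harg2]
      have hcons1 : PySem.List.pyRange a ((a + 1) + (m : Nat) + 1) 1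
          = a :: PySem.List.pyRange (a + 1) ((a + 1) + (m : Nat) + 1) 1 :=
        PySem.List.pyRange_one_cons (by omega)
      have hcons2 : PySem.List.pyRange (a + 1) ((a + 1) + (m : Nat) + 1) 1
          = (a + 1) :: PySem.List.pyRange (a + 1 + 1) ((a + 1) + (m : Nat) + 1) 1 :=
        PySem.List.pyRange_one_cons (by omega)
      have hcons3 : PySem.List.pyRange a ((a + 1) + (m : Nat)) 1
          = a :: PySem.List.pyRange (a + 1) ((a + 1) + (m : Nat)) 1 :=
        PySem.List.pyRange_one_cons (by omega)
      have ih' := ih (a + 1)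
      rw [hcons2] at ih'
      simp only [List.map_cons, List.tail_cons] at ih'
      rw [hcons1, hcons3]
      conv_lhs => rw [hcons2]
      simp only [List.map_cons, List.zip_cons_cons, List.tail_cons]
      rw [ih']

-- ===== VERDICT (by name: the statement is the Claim_ definition above) =====
theorem split_page_chunks_py_spec : Claim_equal_split_page_chunks_py := by
  intro tp pc _
  unfold Spec_split_page_chunks_py split_page_chunks_py split_page_chunks_py_alt
  by_cases htp : tp ≤ 0
  · simp [htp]
  · simp only [if_neg htp]
    set k := max 1 (min pc tp) with hk
    have hk1 : 1 ≤ k := le_max_left _ _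
    have hkt : k ≤ tp := by
      have : min pc tp ≤ tp := min_le_right _ _
      omega
    set base := PySem.Int.floordiv tp k with hbase
    set remain := PySem.Int.mod tp k with hremain
    have hkpos : (0 : Int) < k := by omega
    have hr : 0 ≤ remain := PySem.Int.mod_nonneg tp hkpos
    have hb1 : 1 ≤ base :=
      (PySem.Int.le_floordiv_iff_mul_le hkpos).mpr (by omega)
    obtain ⟨n, hn⟩ : ∃ n : Nat, k = (n : Int) := ⟨k.toNat, by omega⟩
    rw [hn, loopA base remain hr n]
    rw [PySem.List.slice_from_one]
    have hkk : (n : Int) + 1 = ((n + 1 : Nat) : Int) := by push_cast; ring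
    have hz := zip_tail_pairs (fun i => i * base + min i remain) n 0
    simp only [zero_add] at hz
    rw [hz, List.map_map]
    rw [List.filter_eq_self.mpr]
    · rfl
    · intro c hc
      simp only [List.mem_map] at hc
      obtain ⟨i, hi, hic⟩ := hc
      have hlt : pvBound base remain i < pvBound base remain (i + 1) := by
        rw [pvBound_succ]
        split_ifs <;> omega
      subst hic
      have hne : PySem.List.pyRange (pvBound base remain i) (pvBound base remain (i + 1)) 1 ≠ [] := by
        intro hnil
        have hlen := congrArg List.length hnil
        rw [PySem.List.length_pyRange_one] at hlen
        simp only [List.length_nil] at hlen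
        omega
      simpa using hne
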